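-- pv_equiv track=rewrite | github.com/kkinist/multirx | multirx_subs.py | dict_linear_combo
-- ===== SOURCE A (Python) =====
-- def dict_linear_combo(dlist, nlist, nozero=True):
--     '''
--     'dlist' is a list of dicts with numerical values
--        they may have some keys in common, or not
--     'nlist' is a list of corresponding numbers to multiply the dicts
--     Return a dict with the sum
--     If 'nozero' == True, remove elements with value = 0
--     '''
--     dsum = {}
--     for d, n in zip(dlist, nlist):
--         for k, v, in d.items():
--             x = dsum.get(k, 0)
--             dsum[k] = x + v * n
--     if nozero:
--         zkey = [k for k, v in dsum.items() if v == 0]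
--         for k in zkey:
--             del dsum[k]
--     return dsum
-- ===== SOURCE B (Python) =====
-- def dict_linear_combo(dlist, nlist, nozero=True):
--     pairs = list(zip(dlist, nlist))
--     keys = dict.fromkeys(k for d, _ in pairs for k in d)
--     out = {k: sum(d[k] * n for d, n in pairs if k in d) for k in keys}
--     if nozero:
--         out = {k: v for k, v in out.items() if v != 0}
--     return out
-- ===== Notes on version B (the rewrite author's own statement) =====
-- stated objective: alternative
-- what changed: A accumulates dict-outer into a running dict with get/insert and then deletes zero keys; B first computes the first-seen key order once (dict.fromkeys) and builds the result key-outer as a dict comprehension summing each key's contributions across the zipped dicts, filtering zeros in a final comprehension.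
import Mathlib
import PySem

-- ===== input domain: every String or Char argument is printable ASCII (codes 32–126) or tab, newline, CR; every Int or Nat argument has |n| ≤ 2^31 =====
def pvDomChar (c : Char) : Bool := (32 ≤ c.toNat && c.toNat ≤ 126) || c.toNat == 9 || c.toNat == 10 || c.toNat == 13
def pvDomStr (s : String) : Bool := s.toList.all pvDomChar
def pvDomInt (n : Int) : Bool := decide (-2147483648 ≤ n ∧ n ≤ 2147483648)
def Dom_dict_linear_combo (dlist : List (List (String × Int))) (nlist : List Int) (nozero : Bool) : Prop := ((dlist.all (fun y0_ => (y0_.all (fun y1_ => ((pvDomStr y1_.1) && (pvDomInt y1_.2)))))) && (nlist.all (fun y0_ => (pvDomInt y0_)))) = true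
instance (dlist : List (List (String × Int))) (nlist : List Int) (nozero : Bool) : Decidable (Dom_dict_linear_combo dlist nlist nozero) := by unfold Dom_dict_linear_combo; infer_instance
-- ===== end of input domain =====

-- B replaces A's dict-outer accumulation into a running dict by a key-outer dict
-- comprehension over the first-seen key order (objective: alternative decomposition, same cost).

-- ===== PORT A =====
def dict_linear_combo (dlist : List (List (String × Int))) (nlist : List Int) (nozero : Bool) : List (String × Int) :=
  let dsum : PySem.Dict String Int :=
    (dlist.zip nlist).foldl
      (fun dsum dn =>
        dn.1.foldl (fun ds kv => ds.insert kv.1 (ds.getD kv.1 0 + kv.2 * dn.2)) dsum)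
      PySem.Dict.empty
  if nozero then
    let zkey := (dsum.items.filter (fun kv => kv.2 == 0)).map Prod.fst
    (zkey.foldl (fun d k => d.erase k) dsum).items
  else
    dsum.items

-- ===== PORT B =====
def dict_linear_combo_alt (dlist : List (List (String × Int))) (nlist : List Int) (nozero : Bool) : List (String × Int) :=
  let pairs := dlist.zip nlist
  let keys := PySem.List.dedup ((pairs.map (fun dn => dn.1.map Prod.fst)).flatten)
  let out := keys.map (fun k =>
    (k, (pairs.map (fun dn =>
          if (PySem.Dict.mk dn.1).contains k then (PySem.Dict.mk dn.1).getD k 0 * dn.2 else 0)).sum))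
  if nozero then out.filter (fun kv => !(kv.2 == 0)) else out

-- ===== PRECONDITION & SPEC =====
-- Pre_ only enforces the dict type convention: each inner association list stands for a
-- Python dict, whose keys are necessarily distinct; duplicate-key lists represent no Python input.
def Pre_dict_linear_combo (dlist : List (List (String × Int))) (nlist : List Int) (nozero : Bool) : Prop :=
  ∀ d ∈ dlist, (d.map Prod.fst).Nodup
instance (dlist : List (List (String × Int))) (nlist : List Int) (nozero : Bool) : Decidable (Pre_dict_linear_combo dlist nlist nozero) := by unfold Pre_dict_linear_combo; infer_instance

def pvWitness_dict_linear_combo : (List (List (String × Int))) × List Int × Bool :=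
  ([[("a", 1), ("b", 0)], [("a", 2)]], [2, 1], true)

def Spec_dict_linear_combo (dlist : List (List (String × Int))) (nlist : List Int) (nozero : Bool) (out : List (String × Int)) : Prop := out = dict_linear_combo_alt dlist nlist nozero
instance (dlist : List (List (String × Int))) (nlist : List Int) (nozero : Bool) (out : List (String × Int)) : Decidable (Spec_dict_linear_combo dlist nlist nozero out) := by unfold Spec_dict_linear_combo; infer_instance

-- ===== CLAIM (what is proved, stated in full; the proofs are below) =====
def Claim_equal_dict_linear_combo : Prop := ∀ (dlist : List (List (String × Int))) (nlist : List Int) (nozero : Bool), Dom_dict_linear_combo dlist nlist nozero → Pre_dict_linear_combo dlist nlist nozero → Spec_dict_linear_combo dlist nlist nozero (dict_linear_combo dlist nlist nozero)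

-- ===== LEMMAS AND PROOFS =====

-- value of k contributed by one dict d (as B computes it)
def pvContrib (k : String) (dn : List (String × Int) × Int) : Int :=
  if (PySem.Dict.mk dn.1).contains k then (PySem.Dict.mk dn.1).getD k 0 * dn.2 else 0

-- A's inner loop over one dict, seen through getD
lemma inner_getD (n : Int) (d : List (String × Int)) (hd : (d.map Prod.fst).Nodup)
    (ds : PySem.Dict String Int) (k : String) :
    (d.foldl (fun ds kv => ds.insert kv.1 (ds.getD kv.1 0 + kv.2 * n)) ds).getD k 0
      = ds.getD k 0 + pvContrib k (d, n) := by
  induction d generalizing ds with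
  | nil => simp [pvContrib, PySem.Dict.contains_mk]
  | cons kv rest ih =>
    obtain ⟨a, v⟩ := kv
    simp only [List.map_cons, List.nodup_cons] at hd
    obtain ⟨hmem, hrest⟩ := hd
    simp only [List.foldl_cons]
    rw [ih hrest]
    by_cases hk : k = a
    · subst hk
      have hc : (PySem.Dict.mk rest).contains k = false := by
        simp only [PySem.Dict.contains_mk, List.any_eq_false]
        intro p hp
        simp only [beq_iff_eq]
        intro hpk
        exact hmem (List.mem_map.mpr ⟨p, hp, hpk⟩)
      simp [pvContrib, hc, PySem.Dict.contains_mk,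
        PySem.Dict.getD_eq_get?_getD, PySem.Dict.get?_mk_cons]
    · have hbe : (a == k) = false := beq_eq_false_iff_ne.mpr (Ne.symm hk)
      rw [PySem.Dict.getD_insert_of_ne _ _ _ hk]
      have hco : pvContrib k ((a, v) :: rest, n) = pvContrib k (rest, n) := by
        simp only [pvContrib, PySem.Dict.contains_mk, List.any_cons, hbe, Bool.false_or,
          PySem.Dict.getD_eq_get?_getD, PySem.Dict.get?_mk_cons, Bool.false_eq_true, if_false]
      rw [hco]

-- A's outer loop, seen through getD
lemma outer_getD (ps : List (List (String × Int) × Int))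
    (hps : ∀ p ∈ ps, (p.1.map Prod.fst).Nodup) (ds : PySem.Dict String Int) (k : String) :
    (ps.foldl (fun dsum dn =>
        dn.1.foldl (fun ds kv => ds.insert kv.1 (ds.getD kv.1 0 + kv.2 * dn.2)) dsum) ds).getD k 0
      = ds.getD k 0 + (ps.map (pvContrib k)).sum := by
  induction ps generalizing ds with
  | nil => simp
  | cons dn rest ih =>
    simp only [List.foldl_cons, List.map_cons, List.sum_cons]
    rw [ih (fun p hp => hps p (List.mem_cons_of_mem _ hp)),
      inner_getD dn.2 dn.1 (hps dn (List.mem_cons_self)) ds k]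
    ring

-- A's outer loop, seen through keys
lemma outer_keys (ps : List (List (String × Int) × Int)) (ds : PySem.Dict String Int) :
    (ps.foldl (fun dsum dn =>
        dn.1.foldl (fun ds kv => ds.insert kv.1 (ds.getD kv.1 0 + kv.2 * dn.2)) dsum) ds).keys
      = PySem.Set.update ds.keys ((ps.map (fun dn => dn.1.map Prod.fst)).flatten) := by
  induction ps generalizing ds with
  | nil => simp [PySem.Set.update]
  | cons dn rest ih =>
    simp only [List.foldl_cons, List.map_cons, List.flatten_cons]
    rw [ih, PySem.Dict.keys_foldl_insert_key dn.1 Prod.fst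
      (fun ds kv => ds.getD kv.1 0 + kv.2 * dn.2) ds]
    simp [PySem.Set.update, List.foldl_append]

lemma outer_nodup (ps : List (List (String × Int) × Int)) (ds : PySem.Dict String Int)
    (h : ds.keys.Nodup) :
    (ps.foldl (fun dsum dn =>
        dn.1.foldl (fun ds kv => ds.insert kv.1 (ds.getD kv.1 0 + kv.2 * dn.2)) dsum) ds).keys.Nodup := by
  induction ps generalizing ds with
  | nil => exact h
  | cons dn rest ih =>
    simp only [List.foldl_cons]
    exact ih _ (PySem.Dict.nodup_keys_foldl_insert_key dn.1 Prod.fst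
      (fun ds kv => ds.getD kv.1 0 + kv.2 * dn.2) ds h)

-- a dict with distinct keys is its key list paired with its values
lemma items_eq_keys_map (d : PySem.Dict String Int) (h : d.keys.Nodup) :
    d.items = d.keys.map (fun k => (k, d.getD k 0)) := by
  calc d.items = d.items.map id := (List.map_id _).symm
    _ = d.items.map (fun p => (p.1, d.getD p.1 0)) := by
        apply List.map_congr_left
        intro p hp
        obtain ⟨a, v⟩ := p
        simp [PySem.Dict.getD_of_mem_items d hp h 0]
    _ = d.keys.map (fun k => (k, d.getD k 0)) := by
        simp [PySem.Dict.keys, List.map_map, Function.comp]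

lemma foldl_erase_items (ks : List String) (d : PySem.Dict String Int) :
    (ks.foldl (fun d k => d.erase k) d).items
      = d.items.filter (fun p => !ks.contains p.1) := by
  induction ks generalizing d with
  | nil => simp
  | cons a ks ih =>
    simp only [List.foldl_cons]
    rw [ih]
    rw [show (d.erase a).items = d.items.filter (fun p => !(p.1 == a)) from rfl]
    rw [List.filter_filter]
    apply List.filter_congr
    intro p hp
    by_cases hpa : p.1 = a
    · simp [hpa]
    · simp [hpa, Bool.and_comm]

lemma eq_of_fst_eq_of_mem_items (d : PySem.Dict String Int) (h : d.keys.Nodup)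
    {p q : String × Int} (hp : p ∈ d.items) (hq : q ∈ d.items) (hfst : p.1 = q.1) : p = q := by
  obtain ⟨a, v⟩ := p
  obtain ⟨b, w⟩ := q
  obtain rfl : a = b := hfst
  have h1 := PySem.Dict.getD_of_mem_items d hp h 0
  have h2 := PySem.Dict.getD_of_mem_items d hq h 0
  rw [h1.symm.trans h2]

-- ===== VERDICT (by name: the statement is the Claim_ definition above) =====
theorem dict_linear_combo_spec : Claim_equal_dict_linear_combo := by
  intro dlist nlist nozero _hdom hpre
  unfold Spec_dict_linear_combo
  simp only [dict_linear_combo, dict_linear_combo_alt]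
  have hzp : ∀ p ∈ dlist.zip nlist, (p.1.map Prod.fst).Nodup :=
    fun p hp => hpre p.1 (List.of_mem_zip hp).1
  have hnd : ((dlist.zip nlist).foldl
      (fun dsum dn => dn.1.foldl (fun ds kv => ds.insert kv.1 (ds.getD kv.1 0 + kv.2 * dn.2)) dsum)
      PySem.Dict.empty).keys.Nodup :=
    outer_nodup _ _ PySem.Dict.nodup_keys_empty
  have key : ((dlist.zip nlist).foldl
      (fun dsum dn => dn.1.foldl (fun ds kv => ds.insert kv.1 (ds.getD kv.1 0 + kv.2 * dn.2)) dsum)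
      PySem.Dict.empty).items
      = (PySem.List.dedup (((dlist.zip nlist).map (fun dn => dn.1.map Prod.fst)).flatten)).map
          (fun k => (k, ((dlist.zip nlist).map (fun dn =>
            if (PySem.Dict.mk dn.1).contains k then (PySem.Dict.mk dn.1).getD k 0 * dn.2 else 0)).sum)) := by
    rw [items_eq_keys_map _ hnd, outer_keys]
    have hkeys : PySem.Set.update (PySem.Dict.empty (κ := String) (ν := Int)).keys
        (((dlist.zip nlist).map (fun dn => dn.1.map Prod.fst)).flatten)
        = PySem.List.dedup (((dlist.zip nlist).map (fun dn => dn.1.map Prod.fst)).flatten) := by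
      simp [PySem.Dict.keys_empty, PySem.Set.update, PySem.List.dedup, PySem.Set.ofList,
        PySem.Set.empty]
    rw [hkeys]
    apply List.map_congr_left
    intro k _
    rw [outer_getD _ hzp _ k, PySem.Dict.getD_empty, zero_add]
    exact congrArg (fun s => (k, s))
      (congrArg List.sum (List.map_congr_left (fun dn _ => rfl)))
  cases nozero with
  | false =>
    rw [if_neg Bool.false_ne_true, if_neg Bool.false_ne_true]
    exact key
  | true =>
    rw [if_pos rfl, if_pos rfl]
    rw [foldl_erase_items]
    conv_rhs => rw [← key]
    apply List.filter_congr
    intro p hp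
    have hcz : (((((dlist.zip nlist).foldl
        (fun dsum dn => dn.1.foldl (fun ds kv => ds.insert kv.1 (ds.getD kv.1 0 + kv.2 * dn.2)) dsum)
        PySem.Dict.empty).items.filter (fun kv => kv.2 == 0)).map Prod.fst).contains p.1)
        = (p.2 == 0) := by
      by_cases hz : p.2 = 0
      · have h1 : (p.2 == 0) = true := by simp [hz]
        rw [h1, List.contains_iff_mem]
        exact List.mem_map.mpr ⟨p, List.mem_filter.mpr ⟨hp, h1⟩, rfl⟩
      · have h1 : (p.2 == 0) = false := by simp [hz]
        rw [h1, ← Bool.not_eq_true, List.contains_iff_mem]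
        intro hmem
        obtain ⟨q, hq, hqp⟩ := List.mem_map.mp hmem
        obtain ⟨hqi, hq0⟩ := List.mem_filter.mp hq
        have hqe := eq_of_fst_eq_of_mem_items _ hnd hqi hp hqp
        subst hqe
        exact hz (by simpa using hq0)
    rw [hcz]
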